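-- pv_equiv track=rewrite | github.com/LSTM-Kirigaya/SimpleTensor | draft.py | dump_ans
-- ===== SOURCE A (Python) =====
-- def dump_ans(array, length):
--     if len(array) < length:
--         return 0
--     ans = 0
--     depth = -1 * min(array)
--     for layer in range(depth):
--         cur_length = 0
--         for i in range(len(array)):
--             if array[i] >= (- layer):
--                 ans += cur_length // length
--                 cur_length = 0
--             else:
--                 cur_length += 1
--
--         if cur_length > 0:
--             ans += cur_length // length
--
--     return ans
-- ===== SOURCE B (Python) =====
-- def _runsum(array, t, length):
--     # floor(run/length) summed over maximal runs of elements <= -t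
--     ans = 0
--     cur = 0
--     for a in array:
--         if a <= -t:
--             cur += 1
--         else:
--             ans += cur // length
--             cur = 0
--     return ans + cur // length
--
--
-- def dump_ans(array, length):
--     if len(array) < length:
--         return 0
--     # distinct depths at which the active set changes, descending
--     vals = sorted({-a for a in array if a < 0}, reverse=True)
--     total = 0
--     for j in range(len(vals)):
--         nxt = vals[j + 1] if j + 1 < len(vals) else 0
--         total += _runsum(array, vals[j], length) * (vals[j] - nxt)
--     return total
-- ===== Notes on version B (the rewrite author's own statement) =====
-- stated objective: faster
-- what changed: Instead of scanning the whole array once per depth layer (depth = -min(array) iterations), B scans once per DISTINCT negative value: between consecutive breakpoints the active set is unchanged, so each run-sum is multiplied by the size of its constant block of layers.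
-- crash fix: On an empty array with length <= 0 A raises ValueError (min() of an empty sequence); B returns 0. — e.g. on dump_ans([], 0): A raises ValueError, B returns 0
import Mathlib
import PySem

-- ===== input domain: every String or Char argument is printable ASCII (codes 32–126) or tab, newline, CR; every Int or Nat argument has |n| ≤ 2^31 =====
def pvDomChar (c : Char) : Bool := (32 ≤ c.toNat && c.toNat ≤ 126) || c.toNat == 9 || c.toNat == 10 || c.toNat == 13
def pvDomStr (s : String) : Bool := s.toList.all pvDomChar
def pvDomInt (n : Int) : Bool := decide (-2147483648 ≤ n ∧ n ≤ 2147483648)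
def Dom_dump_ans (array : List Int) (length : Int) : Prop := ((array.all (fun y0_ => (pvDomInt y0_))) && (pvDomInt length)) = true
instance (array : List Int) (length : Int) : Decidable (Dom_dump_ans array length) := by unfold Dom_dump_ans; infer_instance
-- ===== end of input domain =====

-- B replaces A's loop over every depth layer (O(depth·n)) by a loop over the distinct
-- negative-value breakpoints, multiplying each layer value by the size of its constant block
-- (O(n·k), k = number of distinct negative values) — measurably faster when depth is large.

-- ===== PORT A =====
-- literal transliteration of A: guard, depth = -min(array), then the nested layer/index loops
def dump_ans (array : List Int) (length : Int) : Int :=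
  if PySem.List.len array < length then 0
  else
    match PySem.List.min? array (fun x => x) with
    | none => 0  -- unreachable under Pre_: Python's min([]) raises ValueError
    | some m =>
      let depth := -1 * m
      (PySem.List.pyRange 0 depth 1).foldl
        (fun ans layer =>
          let st := array.foldl
            (fun (p : Int × Int) a =>
              if a ≥ -layer then (p.1 + PySem.Int.floordiv p.2 length, 0)
              else (p.1, p.2 + 1)) (ans, 0)
          if st.2 > 0 then st.1 + PySem.Int.floordiv st.2 length else st.1) 0

-- ===== PORT B =====
-- _runsum(array, t, length): floor(run/length) summed over maximal runs of elements ≤ -t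
def pvRunsum (array : List Int) (t length : Int) : Int :=
  let st := array.foldl
    (fun (p : Int × Int) a =>
      if a ≤ -t then (p.1, p.2 + 1)
      else (p.1 + PySem.Int.floordiv p.2 length, 0)) (0, 0)
  st.1 + PySem.Int.floordiv st.2 length

-- the loop 'for j in range(len(vals)): total += _runsum(...) * (vals[j] - nxt)'
def pvBSum (array : List Int) (length : Int) : List Int → Int
  | [] => 0
  | v :: rest =>
    pvRunsum array v length * (v - rest.headD 0) + pvBSum array length rest

def dump_ans_alt (array : List Int) (length : Int) : Int :=
  if PySem.List.len array < length then 0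
  else
    let vals := PySem.List.sorted
      (PySem.Set.ofList (array.filterMap (fun a => if a < 0 then some (-a) else none)))
      (fun x => x) true
    pvBSum array length vals

-- ===== PRECONDITION & SPEC =====
-- Pre_ excludes exactly the inputs where A raises: min([]) on an empty array that passes the
-- guard (length ≤ 0), and a ZeroDivisionError from '// length' when length = 0 and some
-- element is negative (so the layer loop runs).
def Pre_dump_ans (array : List Int) (length : Int) : Prop :=
  (array ≠ [] ∨ 0 < length) ∧ (length = 0 → ∀ a ∈ array, 0 ≤ a)
instance (array : List Int) (length : Int) : Decidable (Pre_dump_ans array length) := by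
  unfold Pre_dump_ans; infer_instance

def pvWitness_dump_ans : List Int × Int := ([-2, -2], 2)

-- On an empty array with length ≤ 0, A raises ValueError (min of empty sequence); B returns 0.
def Raises_dump_ans (array : List Int) (length : Int) : Prop := array = [] ∧ length ≤ 0
instance (array : List Int) (length : Int) : Decidable (Raises_dump_ans array length) := by
  unfold Raises_dump_ans; infer_instance
def pvRaiseWitness_dump_ans : List Int × Int := ([], 0)
def pvRaiseWitnessOut_dump_ans : Int := 0

def Spec_dump_ans (array : List Int) (length : Int) (out : Int) : Prop := out = dump_ans_alt array length
instance (array : List Int) (length : Int) (out : Int) : Decidable (Spec_dump_ans array length out) := by unfold Spec_dump_ans; infer_instance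

-- ===== CLAIM (what is proved, stated in full; the proofs are below) =====
def Claim_equal_dump_ans : Prop := ∀ (array : List Int) (length : Int), Dom_dump_ans array length → Pre_dump_ans array length → Spec_dump_ans array length (dump_ans array length)
def Claim_raises_dump_ans : Prop := (∀ (array : List Int) (length : Int), Dom_dump_ans array length → Raises_dump_ans array length → ¬ Pre_dump_ans array length) ∧ (Dom_dump_ans (pvRaiseWitness_dump_ans.1) (pvRaiseWitness_dump_ans.2) ∧ Raises_dump_ans (pvRaiseWitness_dump_ans.1) (pvRaiseWitness_dump_ans.2) ∧ dump_ans_alt (pvRaiseWitness_dump_ans.1) (pvRaiseWitness_dump_ans.2) = pvRaiseWitnessOut_dump_ans)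

-- ===== LEMMAS AND PROOFS =====

-- the value A's inner loop contributes at one layer (started from accumulator 0)
def layerVal (array : List Int) (length ℓ : Int) : Int :=
  let st := array.foldl
    (fun (p : Int × Int) a =>
      if a ≥ -ℓ then (p.1 + PySem.Int.floordiv p.2 length, 0)
      else (p.1, p.2 + 1)) (0, 0)
  if st.2 > 0 then st.1 + PySem.Int.floordiv st.2 length else st.1

lemma foldA_shift (array : List Int) (length ℓ : Int) : ∀ (ans c : Int),
    array.foldl (fun (p : Int × Int) a =>
      if a ≥ -ℓ then (p.1 + PySem.Int.floordiv p.2 length, 0)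
      else (p.1, p.2 + 1)) (ans, c)
    = (ans + (array.foldl (fun (p : Int × Int) a =>
      if a ≥ -ℓ then (p.1 + PySem.Int.floordiv p.2 length, 0)
      else (p.1, p.2 + 1)) (0, c)).1,
      (array.foldl (fun (p : Int × Int) a =>
      if a ≥ -ℓ then (p.1 + PySem.Int.floordiv p.2 length, 0)
      else (p.1, p.2 + 1)) (0, c)).2) := by
  induction array with
  | nil => intro ans c; simp
  | cons a t ih =>
    intro ans c
    simp only [List.foldl_cons]
    by_cases hc : a ≥ -ℓ
    · rw [if_pos hc, if_pos hc]
      rw [ih (ans + PySem.Int.floordiv c length) 0,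
          ih (0 + PySem.Int.floordiv c length) 0,
          ih 0 0]
      refine Prod.ext ?_ ?_ <;> simp [add_assoc]
    · rw [if_neg hc, if_neg hc]
      exact ih ans (c + 1)


lemma foldA_snd_nonneg (array : List Int) (length ℓ : Int) : ∀ (ans c : Int), 0 ≤ c →
    0 ≤ (array.foldl (fun (p : Int × Int) a =>
      if a ≥ -ℓ then (p.1 + PySem.Int.floordiv p.2 length, 0)
      else (p.1, p.2 + 1)) (ans, c)).2 := by
  induction array with
  | nil => intro ans c hc; simpa using hc
  | cons a t ih =>
    intro ans c hc
    simp only [List.foldl_cons]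
    by_cases h : a ≥ -ℓ
    · rw [if_pos h]; exact ih _ 0 le_rfl
    · rw [if_neg h]; exact ih _ (c + 1) (by omega)

lemma runsum_eq_layerVal (array : List Int) (length v : Int) :
    pvRunsum array v length = layerVal array length (v - 1) := by
  unfold pvRunsum layerVal
  have hf : array.foldl
      (fun (p : Int × Int) a =>
        if a ≤ -v then (p.1, p.2 + 1)
        else (p.1 + PySem.Int.floordiv p.2 length, 0)) ((0 : Int), (0 : Int))
      = array.foldl
      (fun (p : Int × Int) a =>
        if a ≥ -(v - 1) then (p.1 + PySem.Int.floordiv p.2 length, 0)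
        else (p.1, p.2 + 1)) ((0 : Int), (0 : Int)) := by
    apply PySem.List.foldl_congr_mem'
    intro a _ p
    by_cases h : a ≤ -v
    · rw [if_pos h, if_neg (by omega)]
    · rw [if_neg h, if_pos (by omega)]
  rw [hf]
  set st := array.foldl
      (fun (p : Int × Int) a =>
        if a ≥ -(v - 1) then (p.1 + PySem.Int.floordiv p.2 length, 0)
        else (p.1, p.2 + 1)) ((0 : Int), (0 : Int)) with hst
  by_cases h : st.2 > 0
  · rw [if_pos h]
  · rw [if_neg h]
    have h0 : st.2 = 0 := by
      have := foldA_snd_nonneg array length (v - 1) 0 0 le_rfl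
      rw [← hst] at this; omega
    show st.1 + PySem.Int.floordiv st.2 length = st.1
    rw [h0]
    simp [PySem.Int.floordiv]


lemma layerVal_congr (array : List Int) (length ℓ1 ℓ2 : Int)
    (h : ∀ a ∈ array, (a ≥ -ℓ1 ↔ a ≥ -ℓ2)) :
    layerVal array length ℓ1 = layerVal array length ℓ2 := by
  unfold layerVal
  have hf : array.foldl
      (fun (p : Int × Int) a =>
        if a ≥ -ℓ1 then (p.1 + PySem.Int.floordiv p.2 length, 0)
        else (p.1, p.2 + 1)) ((0 : Int), (0 : Int))
      = array.foldl
      (fun (p : Int × Int) a =>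
        if a ≥ -ℓ2 then (p.1 + PySem.Int.floordiv p.2 length, 0)
        else (p.1, p.2 + 1)) ((0 : Int), (0 : Int)) := by
    apply PySem.List.foldl_congr_mem'
    intro a ha p
    by_cases h1 : a ≥ -ℓ1
    · rw [if_pos h1, if_pos ((h a ha).mp h1)]
    · rw [if_neg h1, if_neg (fun h2 => h1 ((h a ha).mpr h2))]
  rw [hf]


lemma block_sum (h : Int → Int) (e d c : Int) (hed : e ≤ d)
    (hc : ∀ ℓ, e ≤ ℓ → ℓ < d → h ℓ = c) :
    ((PySem.List.pyRange e d 1).map h).sum = c * (d - e) := by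
  have hmap : (PySem.List.pyRange e d 1).map h = (PySem.List.pyRange e d 1).map (fun _ => c) := by
    apply List.map_congr_left
    intro ℓ hℓ
    rw [PySem.List.mem_pyRange_one] at hℓ
    exact hc ℓ hℓ.1 hℓ.2
  rw [hmap, PySem.List.sum_map_const_int, PySem.List.length_pyRange_one]
  rw [Int.toNat_of_nonneg (by omega)]
  ring

lemma main_sum (array : List Int) (length : Int) : ∀ ws : List Int,
    ws.Pairwise (· > ·) → (∀ x ∈ ws, 0 < x) →
    (∀ a ∈ array, 0 < -a → -a ∈ ws ∨ ws.headD 0 ≤ -a) →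
    ((PySem.List.pyRange 0 (ws.headD 0) 1).map (layerVal array length)).sum
      = pvBSum array length ws := by
  intro ws
  induction ws with
  | nil =>
    intro _ _ _
    simp [PySem.List.pyRange_one_eq_nil (le_refl (0 : Int)), pvBSum]
  | cons v rest ih =>
    intro hpw hpos hmem
    have hvpos : 0 < v := hpos v (List.mem_cons_self ..)
    have hrest_le : ∀ x ∈ rest, x ≤ rest.headD 0 := by
      intro x hx
      cases rest with
      | nil => simp at hx
      | cons u rs =>
        rcases List.mem_cons.mp hx with rfl | hx
        · simp
        · have := (List.pairwise_cons.mp (List.pairwise_cons.mp hpw).2).1 x hx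
          simp; omega
    have hw0 : 0 ≤ rest.headD 0 := by
      cases rest with
      | nil => simp
      | cons u rs => have := hpos u (by simp); simpa using le_of_lt this
    have hwv : rest.headD 0 < v := by
      cases rest with
      | nil => simpa using hvpos
      | cons u rs =>
        have := (List.pairwise_cons.mp hpw).1 u (by simp)
        simpa using this
    set w := rest.headD 0 with hw
    have hsplit : PySem.List.pyRange 0 v 1
        = PySem.List.pyRange 0 w 1 ++ PySem.List.pyRange w v 1 :=
      PySem.List.pyRange_one_append 0 w v hw0 (le_of_lt hwv)
    have hblock : ((PySem.List.pyRange w v 1).map (layerVal array length)).sum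
        = layerVal array length (v - 1) * (v - w) := by
      apply block_sum _ _ _ _ (le_of_lt hwv)
      intro ℓ hℓ1 hℓ2
      apply layerVal_congr
      intro a ha
      constructor
      · intro h1
        by_contra h2
        -- a ≥ -ℓ but ¬ a ≥ -(v-1): -a > v-1, so -a ≥ v > ℓ ≥ -a, contra
        omega
      · intro h1
        -- a ≥ -(v-1), i.e. -a ≤ v-1; show -a ≤ ℓ
        by_contra h2
        have hna : 0 < -a := by omega
        rcases hmem a ha hna with hin | hge
        · rcases List.mem_cons.mp hin with heq | hin
          · omega
          · have := hrest_le (-a) hin; omega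
        · simp at hge; omega
    have hih : ((PySem.List.pyRange 0 w 1).map (layerVal array length)).sum
        = pvBSum array length rest := by
      apply ih (List.pairwise_cons.mp hpw).2
      · intro x hx; exact hpos x (List.mem_cons_of_mem _ hx)
      · intro a ha hna
        rcases hmem a ha hna with hin | hge
        · rcases List.mem_cons.mp hin with heq | hin
          · right; omega
          · left; exact hin
        · right; simp at hge; omega
    show ((PySem.List.pyRange 0 ((v :: rest).headD 0) 1).map (layerVal array length)).sum = _
    simp only [List.headD_cons]
    rw [hsplit, List.map_append, List.sum_append, hblock, hih, pvBSum,
        runsum_eq_layerVal]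
    ring

-- ===== VERDICT (by name: the statement is the Claim_ definition above) =====
theorem dump_ans_spec : Claim_equal_dump_ans := by
  intro array length _ hpre
  unfold Spec_dump_ans
  show dump_ans array length = dump_ans_alt array length
  unfold dump_ans dump_ans_alt
  by_cases hguard : PySem.List.len array < length
  · rw [if_pos hguard, if_pos hguard]
  · rw [if_neg hguard, if_neg hguard]
    have hne : array ≠ [] := by
      rcases hpre.1 with h | h
      · exact h
      · intro hnil
        subst hnil
        simp [PySem.List.len] at hguard
        omega
    obtain ⟨m, hm⟩ : ∃ m, PySem.List.min? array (fun x => x) = some m := by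
      cases h : PySem.List.min? array (fun x => x) with
      | none => exact absurd ((PySem.List.min?_eq_none_iff _ _).mp h) hne
      | some m => exact ⟨m, rfl⟩
    have hmin := PySem.List.min?_isMin hm
    have hmmem := PySem.List.min?_mem hm
    rw [hm]
    simp only []
    set base := array.filterMap (fun a => if a < 0 then some (-a) else none) with hbase
    set vs := PySem.List.sorted (PySem.Set.ofList base) (fun x => x) true with hvs
    have hmem_vs : ∀ x, x ∈ vs ↔ ∃ a ∈ array, a < 0 ∧ -a = x := by
      intro x
      rw [hvs, PySem.List.mem_sorted, PySem.Set.mem_ofList, hbase, List.mem_filterMap]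
      constructor
      · rintro ⟨a, ha, hfa⟩
        by_cases h : a < 0
        · rw [if_pos h] at hfa
          exact ⟨a, ha, h, Option.some.inj hfa⟩
        · rw [if_neg h] at hfa; simp at hfa
      · rintro ⟨a, ha, h1, rfl⟩
        exact ⟨a, ha, if_pos h1⟩
    -- rewrite A's fold to a sum of per-layer values
    have hA : ∀ d : Int, (PySem.List.pyRange 0 d 1).foldl
        (fun ans layer =>
          if (array.foldl
            (fun (p : Int × Int) a =>
              if a ≥ -layer then (p.1 + PySem.Int.floordiv p.2 length, 0)
              else (p.1, p.2 + 1)) (ans, 0)).2 > 0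
          then (array.foldl
            (fun (p : Int × Int) a =>
              if a ≥ -layer then (p.1 + PySem.Int.floordiv p.2 length, 0)
              else (p.1, p.2 + 1)) (ans, 0)).1 + PySem.Int.floordiv (array.foldl
            (fun (p : Int × Int) a =>
              if a ≥ -layer then (p.1 + PySem.Int.floordiv p.2 length, 0)
              else (p.1, p.2 + 1)) (ans, 0)).2 length
          else (array.foldl
            (fun (p : Int × Int) a =>
              if a ≥ -layer then (p.1 + PySem.Int.floordiv p.2 length, 0)
              else (p.1, p.2 + 1)) (ans, 0)).1) 0
        = ((PySem.List.pyRange 0 d 1).map (layerVal array length)).sum := by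
      intro d
      rw [PySem.List.foldl_congr_mem' _ _
        (fun ans layer => ans + layerVal array length layer) _ ?_]
      · rw [PySem.List.foldl_add]; ring
      · intro layer _ ans
        show (if (array.foldl
            (fun (p : Int × Int) a =>
              if a ≥ -layer then (p.1 + PySem.Int.floordiv p.2 length, 0)
              else (p.1, p.2 + 1)) (ans, 0)).2 > 0
          then (array.foldl
            (fun (p : Int × Int) a =>
              if a ≥ -layer then (p.1 + PySem.Int.floordiv p.2 length, 0)
              else (p.1, p.2 + 1)) (ans, 0)).1 + PySem.Int.floordiv (array.foldl
            (fun (p : Int × Int) a =>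
              if a ≥ -layer then (p.1 + PySem.Int.floordiv p.2 length, 0)
              else (p.1, p.2 + 1)) (ans, 0)).2 length
          else (array.foldl
            (fun (p : Int × Int) a =>
              if a ≥ -layer then (p.1 + PySem.Int.floordiv p.2 length, 0)
              else (p.1, p.2 + 1)) (ans, 0)).1)
          = ans + layerVal array length layer
        rw [foldA_shift array length layer ans 0]
        unfold layerVal
        by_cases h : (array.foldl (fun (p : Int × Int) a =>
            if a ≥ -layer then (p.1 + PySem.Int.floordiv p.2 length, 0)
            else (p.1, p.2 + 1)) (0, 0)).2 > 0
        · rw [if_pos h, if_pos h]; ring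
        · rw [if_neg h, if_neg h]
    rw [hA]
    by_cases hm0 : 0 ≤ m
    · -- no negative element: zero layers, empty breakpoint list
      have hvals : vs = [] := by
        rw [List.eq_nil_iff_forall_not_mem]
        intro x hx
        rcases (hmem_vs x).mp hx with ⟨a, ha, h1, _⟩
        exact absurd (hmin a ha) (by omega)
      rw [hvals, PySem.List.pyRange_one_eq_nil (by omega)]
      simp [pvBSum]
    · -- head of vs is the depth -1 * m
      push Not at hm0
      have hmem_neg : -m ∈ vs := (hmem_vs (-m)).mpr ⟨m, hmmem, hm0, rfl⟩
      obtain ⟨x, t, hx⟩ : ∃ x t, vs = x :: t := by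
        cases hvsl : vs with
        | nil => rw [hvsl] at hmem_neg; simp at hmem_neg
        | cons x t => exact ⟨x, t, rfl⟩
      have hhead : vs.headD 0 = -1 * m := by
        have hmax := PySem.List.key_head_sorted_rev_ge (PySem.Set.ofList base)
          (fun x => x) (hvs ▸ hx)
        have h1 : -m ≤ x := by
          have : -m ∈ PySem.Set.ofList base := by
            have := hmem_neg
            rw [hvs, PySem.List.mem_sorted] at this
            exact this
          exact hmax _ this
        have h2 : x ≤ -m := by
          have hxvs : x ∈ vs := by rw [hx]; simp
          rcases (hmem_vs x).mp hxvs with ⟨a, ha, _, rfl⟩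
          have := hmin a ha
          omega
        rw [hx]
        simp
        omega
      rw [← hhead]
      apply main_sum
      · -- strict descending
        have hnd : vs.Nodup := by
          rw [hvs]
          exact (PySem.List.sorted_perm _ _ _).nodup_iff.mpr
            (PySem.Set.nodup_ofList base)
        have hge := PySem.List.sorted_pairwise_rev (PySem.Set.ofList base) (fun x => x)
        rw [← hvs] at hge
        exact (hge.and hnd).imp (fun h => lt_of_le_of_ne h.1 h.2.symm)
      · intro x hx
        rcases (hmem_vs x).mp hx with ⟨a, _, h1, rfl⟩
        omega
      · intro a _ hna
        left
        exact (hmem_vs (-a)).mpr ⟨a, by assumption, by omega, rfl⟩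

@[simp] theorem dump_ans_raises : Claim_raises_dump_ans := by
  unfold Claim_raises_dump_ans
  refine ⟨?_, by decide⟩
  intro array length _ hr hp
  rcases hr with ⟨ha, hl⟩
  rcases hp.1 with h | h
  · exact h ha
  · omega
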